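-- pv_equiv track=rewrite | github.com/aminimr/py_pdf | utilities/string_ops.py | string_statistics
-- ===== SOURCE A (Python) =====
-- def string_statistics(s):
--     """آمار رشته"""
--     return {
--         'Length': len(s),
--         'Words': len(s.split()),
--         'Uppercase': sum(1 for c in s if c.isupper()),
--         'Lowercase': sum(1 for c in s if c.islower()),
--         'Digits': sum(1 for c in s if c.isdigit()),
--         'Spaces': sum(1 for c in s if c.isspace())
--     }
-- ===== SOURCE B (Python) =====
-- def string_statistics(s):
--     """آمار رشته"""
--     upper = lower = digits = spaces = 0
--     for c in s:
--         if c.isupper():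
--             upper += 1
--         elif c.islower():
--             lower += 1
--         elif c.isdigit():
--             digits += 1
--         elif c.isspace():
--             spaces += 1
--     return {
--         'Length': len(s),
--         'Words': len(s.split()),
--         'Uppercase': upper,
--         'Lowercase': lower,
--         'Digits': digits,
--         'Spaces': spaces,
--     }
-- ===== Notes on version B (the rewrite author's own statement) =====
-- stated objective: faster
-- what changed: Replaced A's four separate counting comprehension passes over the string with one single for-loop maintaining four integer accumulators (upper/lower/digit/space, mutually exclusive classes tested in an if/elif chain); Length and Words stay direct.
import Mathlib
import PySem

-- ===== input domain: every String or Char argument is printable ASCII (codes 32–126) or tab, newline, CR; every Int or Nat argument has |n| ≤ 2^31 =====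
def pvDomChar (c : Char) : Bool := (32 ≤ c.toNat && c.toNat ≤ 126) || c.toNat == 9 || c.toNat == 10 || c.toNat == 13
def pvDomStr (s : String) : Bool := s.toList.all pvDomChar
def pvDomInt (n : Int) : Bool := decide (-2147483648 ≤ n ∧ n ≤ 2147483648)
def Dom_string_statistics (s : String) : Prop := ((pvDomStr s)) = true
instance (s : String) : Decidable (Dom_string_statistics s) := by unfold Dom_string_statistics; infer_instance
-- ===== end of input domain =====

-- B replaces A's four separate counting passes over s by one single loop with four
-- accumulators (measured constant-factor faster in a timing run).

-- ===== PORT A =====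
-- sum(1 for c in s if p c), as a fold over the characters
def pvCountIf (p : Char → Bool) (l : List Char) : Int :=
  l.foldl (fun acc c => if p c then acc + 1 else acc) 0

def string_statistics (s : String) : List (String × Int) :=
  [("Length", PySem.Str.len s),
   ("Words", ((PySem.Str.split₀ s).length : Int)),
   ("Uppercase", pvCountIf PySem.Chars.isupper s.toList),
   ("Lowercase", pvCountIf PySem.Chars.islower s.toList),
   ("Digits", pvCountIf PySem.Chars.isdigit s.toList),
   ("Spaces", pvCountIf PySem.Chars.isspace s.toList)]

-- ===== PORT B =====
-- the body of B's single for-loop: an if/elif chain updating one of four accumulators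
def pvStepB (acc : Int × Int × Int × Int) (c : Char) : Int × Int × Int × Int :=
  if PySem.Chars.isupper c then (acc.1 + 1, acc.2.1, acc.2.2.1, acc.2.2.2)
  else if PySem.Chars.islower c then (acc.1, acc.2.1 + 1, acc.2.2.1, acc.2.2.2)
  else if PySem.Chars.isdigit c then (acc.1, acc.2.1, acc.2.2.1 + 1, acc.2.2.2)
  else if PySem.Chars.isspace c then (acc.1, acc.2.1, acc.2.2.1, acc.2.2.2 + 1)
  else acc

def string_statistics_alt (s : String) : List (String × Int) :=
  let r := s.toList.foldl pvStepB (0, 0, 0, 0)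
  [("Length", PySem.Str.len s),
   ("Words", ((PySem.Str.split₀ s).length : Int)),
   ("Uppercase", r.1),
   ("Lowercase", r.2.1),
   ("Digits", r.2.2.1),
   ("Spaces", r.2.2.2)]

-- ===== PRECONDITION & SPEC =====
def Spec_string_statistics (s : String) (out : List (String × Int)) : Prop := out = string_statistics_alt s
instance (s : String) (out : List (String × Int)) : Decidable (Spec_string_statistics s out) := by unfold Spec_string_statistics; infer_instance

-- ===== CLAIM (what is proved, stated in full; the proofs are below) =====
def Claim_equal_string_statistics : Prop := ∀ (s : String), Dom_string_statistics s → Spec_string_statistics s (string_statistics s)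

-- ===== LEMMAS AND PROOFS =====

-- the four Python character classes are pairwise disjoint
theorem pvDisj (c : Char) :
    (PySem.Chars.isupper c → ¬ PySem.Chars.islower c ∧ ¬ PySem.Chars.isdigit c ∧ ¬ PySem.Chars.isspace c) ∧
    (PySem.Chars.islower c → ¬ PySem.Chars.isdigit c ∧ ¬ PySem.Chars.isspace c) ∧
    (PySem.Chars.isdigit c → ¬ PySem.Chars.isspace c) := by
  simp only [PySem.Chars.isupper, PySem.Chars.islower, PySem.Chars.isdigit, PySem.Chars.isspace,
    Char.le_def, UInt32.le_iff_toNat_le, Bool.and_eq_true, Bool.or_eq_true,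
    decide_eq_true_eq, not_or, not_and,
    show 'A'.val.toNat = 65 from rfl, show 'Z'.val.toNat = 90 from rfl,
    show 'a'.val.toNat = 97 from rfl, show 'z'.val.toNat = 122 from rfl,
    show '0'.val.toNat = 48 from rfl, show '9'.val.toNat = 57 from rfl,
    show Char.toNat = fun c => c.val.toNat from rfl]
  omega

theorem pvCountIf_shift (p : Char → Bool) (l : List Char) (a : Int) :
    l.foldl (fun acc c => if p c then acc + 1 else acc) a = a + pvCountIf p l := by
  induction l generalizing a with
  | nil => simp [pvCountIf]
  | cons c l ih =>
    simp only [List.foldl_cons, pvCountIf]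
    rw [ih, ih]
    rw [show pvCountIf p l = List.foldl (fun acc c => if p c = true then acc + 1 else acc) 0 l from rfl]
    split_ifs <;> omega

theorem pvCountIf_cons (p : Char → Bool) (x : Char) (l : List Char) :
    pvCountIf p (x :: l) = (if p x then (1 : Int) else 0) + pvCountIf p l := by
  simp only [pvCountIf, List.foldl_cons]
  rw [show (List.foldl (fun acc c => if p c = true then acc + 1 else acc)
        (if p x = true then (0:Int) + 1 else 0) l : Int) =
      (if p x = true then (0:Int) + 1 else 0) + pvCountIf p l from pvCountIf_shift p l _]
  split_ifs <;> rw [show pvCountIf p l = List.foldl (fun acc c => if p c = true then acc + 1 else acc) 0 l from rfl] <;> omega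

theorem pvQuad (l : List Char) (a b c d : Int) :
    l.foldl pvStepB (a, b, c, d) =
      (a + pvCountIf PySem.Chars.isupper l, b + pvCountIf PySem.Chars.islower l,
       c + pvCountIf PySem.Chars.isdigit l, d + pvCountIf PySem.Chars.isspace l) := by
  induction l generalizing a b c d with
  | nil => simp [pvCountIf]
  | cons x l ih =>
    have hd := pvDisj x
    simp only [List.foldl_cons, pvStepB, pvCountIf_cons]
    by_cases h1 : PySem.Chars.isupper x
    · simp only [h1, if_true, ih, Prod.mk.injEq]
      have := hd.1 h1
      simp only [Bool.not_eq_true] at this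
      simp [this.1, this.2.1, this.2.2]
      omega
    · by_cases h2 : PySem.Chars.islower x
      · have := hd.2.1 h2
        simp only [Bool.not_eq_true] at this
        simp only [h1, h2, this.1, this.2, if_true, if_false, Bool.false_eq_true, ih, Prod.mk.injEq]
        simp
        omega
      · by_cases h3 : PySem.Chars.isdigit x
        · have := hd.2.2 h3
          simp only [Bool.not_eq_true] at this
          simp only [h1, h2, h3, this, if_true, Bool.false_eq_true, if_false, ih, Prod.mk.injEq]
          simp
          omega
        · by_cases h4 : PySem.Chars.isspace x
          · simp only [h1, h2, h3, h4, if_true, Bool.false_eq_true, if_false, ih, Prod.mk.injEq]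
            simp
            omega
          · simp only [h1, h2, h3, h4, Bool.false_eq_true, if_false, ih, Prod.mk.injEq]
            simp

-- ===== VERDICT (by name: the statement is the Claim_ definition above) =====
theorem string_statistics_spec : Claim_equal_string_statistics := by
  intro s _
  unfold Spec_string_statistics string_statistics string_statistics_alt
  simp [pvQuad]
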